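-- pv_equiv track=rewrite | github.com/pisterlabs/promptset | data/scraping-2.0/repos/codeagents~hackgpt/simulate.py | parse_objective
-- ===== SOURCE A (Python) =====
-- def parse_objective(objective: str) -> list[str]:
--     """
--     Extracts code from a string delimited by triple tick markers (```).
--
--     Args:
--         objective (str): the string containing natural language and code.
--
--     Returns:
--         A list of strings representing the code blocks found in the input string.
--     """
--     code_blocks = []
--     start_idx = 0
--
--     while True:
--         start_idx = objective.find("```", start_idx)
--         if start_idx == -1:
--             break
--
--         end_idx = objective.find("```", start_idx + 3)
--         if end_idx == -1:
--             break
--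
--         code_blocks.append(objective[start_idx + 3: end_idx].strip())
--         start_idx = end_idx + 3
--
--     return code_blocks
-- ===== SOURCE B (Python) =====
-- def parse_objective(objective: str) -> list[str]:
--     """Single left-to-right scan: each non-overlapping ``` toggles between
--     outside/inside a code block; characters seen while inside are collected,
--     and a block is emitted when its closing marker is reached."""
--     blocks = []
--     cur = None  # None = outside a block, list of chars = inside
--     i = 0
--     n = len(objective)
--     while i < n:
--         if objective.startswith("```", i):
--             if cur is None:
--                 cur = []
--             else:
--                 blocks.append("".join(cur).strip())
--                 cur = None
--             i += 3
--         else: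
--             if cur is not None:
--                 cur.append(objective[i])
--             i += 1
--     return blocks
-- ===== Notes on version B (the rewrite author's own statement) =====
-- stated objective: alternative
-- what changed: A repeatedly calls str.find to locate each pair of ``` markers and slices the text between them; B makes a single left-to-right character scan in which each non-overlapping ``` toggles an outside/inside state, collecting characters while inside and emitting the stripped block at each closing marker.
import Mathlib
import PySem

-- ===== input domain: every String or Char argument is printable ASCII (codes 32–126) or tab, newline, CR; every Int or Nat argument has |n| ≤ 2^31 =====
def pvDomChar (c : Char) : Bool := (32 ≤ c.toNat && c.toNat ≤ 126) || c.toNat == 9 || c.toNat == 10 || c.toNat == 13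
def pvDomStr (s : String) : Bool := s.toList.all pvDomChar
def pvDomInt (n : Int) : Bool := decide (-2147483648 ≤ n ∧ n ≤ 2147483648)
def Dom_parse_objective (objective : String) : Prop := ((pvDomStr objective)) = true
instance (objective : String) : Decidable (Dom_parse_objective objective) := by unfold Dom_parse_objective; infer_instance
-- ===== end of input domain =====

-- B replaces A's repeated-find loop by a single left-to-right toggle scan; alternative decomposition, same cost.

-- ===== PORT A =====
-- A-side helpers: the delimiter, and two facts about findFrom needed by the loop's termination proof.
def pvBT : List Char := ['`', '`', '`']

theorem pvFindFrom_gt_len (s sub : List Char) (k : Nat) (h : s.length < k) :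
    PySem.Chars.findFrom s sub (k : Int) none = -1 := by
  simp only [PySem.Chars.findFrom]
  norm_num
  omega

theorem pvFindFrom_facts (s sub : List Char) (k : Nat)
    (h : PySem.Chars.findFrom s sub (k : Int) none ≠ -1) :
    (k : Int) ≤ PySem.Chars.findFrom s sub (k : Int) none ∧
      sub <+: s.drop (PySem.Chars.findFrom s sub (k : Int) none).toNat ∧ k ≤ s.length := by
  by_cases hk : k ≤ s.length
  · obtain ⟨h1, h2, _⟩ := PySem.Chars.findFrom_natCast_spec s sub k hk h
    exact ⟨h1, h2, hk⟩
  · exact absurd (pvFindFrom_gt_len s sub k (by omega)) h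

-- transliteration of A's while-loop: start_idx is the Nat cursor, acc the code_blocks list (reversed)
def pvLoopA (s : List Char) (start : Nat) (acc : List String) : List String :=
  if hi : PySem.Chars.findFrom s pvBT (start : Int) none = -1 then acc.reverse
  else
    if hj : PySem.Chars.findFrom s pvBT
        (PySem.Chars.findFrom s pvBT (start : Int) none + 3) none = -1 then acc.reverse
    else
      pvLoopA s
        (PySem.Chars.findFrom s pvBT
          (PySem.Chars.findFrom s pvBT (start : Int) none + 3) none + 3).toNat
        (String.mk (PySem.Chars.strip (PySem.List.slice s
            (some (PySem.Chars.findFrom s pvBT (start : Int) none + 3))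
            (some (PySem.Chars.findFrom s pvBT
              (PySem.Chars.findFrom s pvBT (start : Int) none + 3) none)))) :: acc)
termination_by s.length + 1 - start
decreasing_by
  obtain ⟨hi1, hi2, hi3⟩ := pvFindFrom_facts s pvBT start hi
  have hi0 : 0 ≤ PySem.Chars.findFrom s pvBT (start : Int) none := by
    have : (0 : Int) ≤ (start : Int) := by positivity
    omega
  have hleni : (PySem.Chars.findFrom s pvBT (start : Int) none).toNat + 3 ≤ s.length := by
    have := hi2.length_le
    rw [List.length_drop] at this
    have hbt : pvBT.length = 3 := rfl
    omega
  have hcast : PySem.Chars.findFrom s pvBT (start : Int) none + 3 =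
      (((PySem.Chars.findFrom s pvBT (start : Int) none).toNat + 3 : Nat) : Int) := by omega
  rw [hcast] at hj ⊢
  obtain ⟨hj1, hj2, -⟩ :=
    pvFindFrom_facts s pvBT ((PySem.Chars.findFrom s pvBT (start : Int) none).toNat + 3) hj
  have hlenj : (PySem.Chars.findFrom s pvBT
      (((PySem.Chars.findFrom s pvBT (start : Int) none).toNat + 3 : Nat) : Int) none).toNat + 3
      ≤ s.length := by
    have := hj2.length_le
    rw [List.length_drop] at this
    have hbt : pvBT.length = 3 := rfl
    omega
  clear hj2
  omega

def parse_objective (objective : String) : List String :=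
  pvLoopA objective.toList 0 []

-- ===== PORT B =====
-- transliteration of B's scan: cur = None / list of collected chars (kept reversed, the Lean
-- encoding of Python's cur.append), acc = blocks (reversed)
def pvScanB : List Char → Option (List Char) → List String → List String
  | [], _, acc => acc.reverse
  | c :: rest, cur, acc =>
    if pvBT.isPrefixOf (c :: rest) then
      match cur with
      | none => pvScanB (List.drop 3 (c :: rest)) (some []) acc
      | some cs => pvScanB (List.drop 3 (c :: rest)) none
          (String.mk (PySem.Chars.strip cs.reverse) :: acc)
    else
      match cur with
      | none => pvScanB rest none acc
      | some cs => pvScanB rest (some (c :: cs)) acc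
termination_by l _ _ => l.length
decreasing_by all_goals simp [List.length_drop]

def parse_objective_alt (objective : String) : List String :=
  pvScanB objective.toList none []

-- ===== PRECONDITION & SPEC =====
def Spec_parse_objective (objective : String) (out : List String) : Prop := out = parse_objective_alt objective
instance (objective : String) (out : List String) : Decidable (Spec_parse_objective objective out) := by unfold Spec_parse_objective; infer_instance

-- ===== CLAIM (what is proved, stated in full; the proofs are below) =====
def Claim_equal_parse_objective : Prop := ∀ (objective : String), Dom_parse_objective objective → Spec_parse_objective objective (parse_objective objective)

-- ===== LEMMAS AND PROOFS =====
theorem pvGo_nil (sub : List Char) (k : Nat) :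
    PySem.Chars.find.go sub [] k = if sub.isEmpty then (k : Int) else -1 := by
  simp [PySem.Chars.find.go]

theorem pvGo_cons (sub : List Char) (c : Char) (t : List Char) (k : Nat) :
    PySem.Chars.find.go sub (c :: t) k =
      if sub.isPrefixOf (c :: t) then (k : Int) else PySem.Chars.find.go sub t (k + 1) := by
  simp [PySem.Chars.find.go]

theorem pvGo_shift (l : List Char) : ∀ k : Nat,
    PySem.Chars.find.go pvBT l k =
      if PySem.Chars.find.go pvBT l 0 = -1 then -1 else PySem.Chars.find.go pvBT l 0 + k := by
  induction l with
  | nil => intro k; simp [pvGo_nil, pvBT]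
  | cons c t ih =>
    intro k
    rw [pvGo_cons, pvGo_cons]
    by_cases hp : pvBT.isPrefixOf (c :: t)
    · simp [hp]
    · simp only [hp, Bool.false_eq_true, if_false]
      rw [ih (k + 1), ih 1]
      have hge : -1 ≤ PySem.Chars.find.go pvBT t 0 := PySem.Chars.neg_one_le_find t pvBT
      split_ifs <;> push_cast <;> omega

theorem pvFind_nil : PySem.Chars.find ([] : List Char) pvBT = -1 := by
  simp [PySem.Chars.find, pvGo_nil, pvBT]

theorem pvFind_cons (c : Char) (t : List Char) :
    PySem.Chars.find (c :: t) pvBT =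
      if pvBT.isPrefixOf (c :: t) then 0
      else if PySem.Chars.find t pvBT = -1 then -1 else PySem.Chars.find t pvBT + 1 := by
  simp only [PySem.Chars.find, pvGo_cons]
  have hge : -1 ≤ PySem.Chars.find.go pvBT t 0 := PySem.Chars.neg_one_le_find t pvBT
  rw [pvGo_shift t 1]
  split_ifs <;> push_cast <;> omega

theorem pvScan_none (l : List Char) (acc : List String) :
    pvScanB l none acc =
      if PySem.Chars.find l pvBT = -1 then acc.reverse
      else pvScanB (l.drop ((PySem.Chars.find l pvBT).toNat + 3)) (some []) acc := by
  induction l with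
  | nil => simp [pvScanB, pvFind_nil]
  | cons c t ih =>
    rw [pvScanB, pvFind_cons]
    by_cases hp : pvBT.isPrefixOf (c :: t)
    · simp [hp]
    · simp only [hp, Bool.false_eq_true, if_false]
      rw [ih]
      have hge : -1 ≤ PySem.Chars.find t pvBT := PySem.Chars.neg_one_le_find t pvBT
      by_cases h0 : PySem.Chars.find t pvBT = -1
      · simp [h0]
      · have hpos : 0 ≤ PySem.Chars.find t pvBT := by omega
        have hne : ¬(PySem.Chars.find t pvBT + 1 = -1) := by omega
        have : (PySem.Chars.find t pvBT + 1).toNat + 3 =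
            ((PySem.Chars.find t pvBT).toNat + 3) + 1 := by omega
        simp [h0, hne, this, List.drop_succ_cons]

theorem pvScan_some (l : List Char) : ∀ (cs : List Char) (acc : List String),
    pvScanB l (some cs) acc =
      if PySem.Chars.find l pvBT = -1 then acc.reverse
      else pvScanB (l.drop ((PySem.Chars.find l pvBT).toNat + 3)) none
        (String.mk (PySem.Chars.strip
          (cs.reverse ++ l.take (PySem.Chars.find l pvBT).toNat)) :: acc) := by
  induction l with
  | nil => intro cs acc; simp [pvScanB, pvFind_nil]
  | cons c t ih =>
    intro cs acc
    rw [pvScanB, pvFind_cons]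
    by_cases hp : pvBT.isPrefixOf (c :: t)
    · simp [hp]
    · simp only [hp, Bool.false_eq_true, if_false]
      rw [ih]
      have hge : -1 ≤ PySem.Chars.find t pvBT := PySem.Chars.neg_one_le_find t pvBT
      by_cases h0 : PySem.Chars.find t pvBT = -1
      · simp [h0]
      · have hpos : 0 ≤ PySem.Chars.find t pvBT := by omega
        have h1 : (PySem.Chars.find t pvBT + 1).toNat + 3 =
            ((PySem.Chars.find t pvBT).toNat + 3) + 1 := by omega
        have hne : ¬(PySem.Chars.find t pvBT + 1 = -1) := by omega
        have h2 : (PySem.Chars.find t pvBT + 1).toNat =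
            (PySem.Chars.find t pvBT).toNat + 1 := by omega
        simp [h0, hne, h2, List.drop_succ_cons, List.take_succ_cons]

theorem pvLoop_eq_scan (s : List Char) : ∀ (n start : Nat) (acc : List String),
    s.length - start ≤ n → pvLoopA s start acc = pvScanB (s.drop start) none acc := by
  intro n
  induction n using Nat.strong_induction_on with
  | _ n ih =>
    intro start acc hn
    rw [pvLoopA]
    by_cases hsl : s.length < start
    · have hdrop : s.drop start = [] := List.drop_eq_nil_of_le (by omega)
      rw [pvFindFrom_gt_len s pvBT start hsl]
      simp [hdrop, pvScanB]
    · have hk : start ≤ s.length := by omega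
      rw [PySem.Chars.findFrom_natCast s pvBT start hk]
      rw [pvScan_none]
      by_cases h0 : PySem.Chars.find (s.drop start) pvBT = -1
      · simp [h0]
      · simp only [h0, if_false]
        have hge0 : 0 ≤ PySem.Chars.find (s.drop start) pvBT := by
          have := PySem.Chars.neg_one_le_find (s.drop start) pvBT; omega
        obtain ⟨hpre, -⟩ := PySem.Chars.find_spec (s := s.drop start) (sub := pvBT) hge0
        have hlen0 : (PySem.Chars.find (s.drop start) pvBT).toNat + 3 ≤ s.length - start := by
          have := hpre.length_le
          simp only [List.length_drop] at this
          have hbt : pvBT.length = 3 := rfl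
          omega
        -- k2 = index after the opening marker
        set f0 := PySem.Chars.find (s.drop start) pvBT with hf0
        have hcast : (start : Int) + f0 + 3 = ((start + f0.toNat + 3 : Nat) : Int) := by
          push_cast; omega
        rw [hcast, PySem.Chars.findFrom_natCast s pvBT (start + f0.toNat + 3) (by omega)]
        have hdd : s.drop (start + f0.toNat + 3) = (s.drop start).drop (f0.toNat + 3) := by
          rw [List.drop_drop]; ring_nf
        rw [pvScan_some, hdd]
        have hc1 : ¬((start : Int) + f0 = -1) := by omega
        have hdd' : List.drop (start + (f0.toNat + 3)) s =
            (s.drop start).drop (f0.toNat + 3) := by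
          rw [List.drop_drop]
        by_cases h1 : PySem.Chars.find ((s.drop start).drop (f0.toNat + 3)) pvBT = -1
        · have h1' : PySem.Chars.find (List.drop (start + (f0.toNat + 3)) s) pvBT = -1 := by
            rw [hdd']; exact h1
          simp [hc1, h1']
        · have hge1 : 0 ≤ PySem.Chars.find ((s.drop start).drop (f0.toNat + 3)) pvBT := by
            have := PySem.Chars.neg_one_le_find ((s.drop start).drop (f0.toNat + 3)) pvBT
            omega
          obtain ⟨hpre1, -⟩ :=
            PySem.Chars.find_spec (s := (s.drop start).drop (f0.toNat + 3)) (sub := pvBT) hge1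
          have hlen1 : (PySem.Chars.find ((s.drop start).drop (f0.toNat + 3)) pvBT).toNat + 3 ≤
              s.length - (start + f0.toNat + 3) := by
            have := hpre1.length_le
            simp only [List.length_drop] at this
            have hbt : pvBT.length = 3 := rfl
            omega
          have hc2 : ¬(((start + f0.toNat + 3 : Nat) : Int) +
              PySem.Chars.find ((s.drop start).drop (f0.toNat + 3)) pvBT = -1) := by
            push_cast
            omega
          rw [if_neg h1, dif_neg hc1, dif_neg hc2]
          have hK : (((start + f0.toNat + 3 : Nat) : Int) +
              PySem.Chars.find ((s.drop start).drop (f0.toNat + 3)) pvBT + 3).toNat =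
              start + f0.toNat + 3 +
                (PySem.Chars.find ((s.drop start).drop (f0.toNat + 3)) pvBT).toNat + 3 := by
            omega
          have hslice : PySem.List.slice s (some ((start + f0.toNat + 3 : Nat) : Int))
              (some (((start + f0.toNat + 3 : Nat) : Int) +
                PySem.Chars.find ((s.drop start).drop (f0.toNat + 3)) pvBT)) =
              ((s.drop start).drop (f0.toNat + 3)).take
                (PySem.Chars.find ((s.drop start).drop (f0.toNat + 3)) pvBT).toNat := by
            have hb : ((start + f0.toNat + 3 : Nat) : Int) +
                PySem.Chars.find ((s.drop start).drop (f0.toNat + 3)) pvBT =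
                ((start + f0.toNat + 3 +
                  (PySem.Chars.find ((s.drop start).drop (f0.toNat + 3)) pvBT).toNat : Nat) : Int) := by
              push_cast
              omega
            rw [hb, PySem.List.slice_natCast, hdd]
            congr 1
            omega
          rw [hK, hslice]
          rw [ih (s.length - (start + f0.toNat + 3 +
              (PySem.Chars.find ((s.drop start).drop (f0.toNat + 3)) pvBT).toNat + 3))
            (by omega) _ _ (by omega)]
          have hdd2 : s.drop (start + f0.toNat + 3 +
              (PySem.Chars.find ((s.drop start).drop (f0.toNat + 3)) pvBT).toNat + 3) =
              ((s.drop start).drop (f0.toNat + 3)).drop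
                ((PySem.Chars.find ((s.drop start).drop (f0.toNat + 3)) pvBT).toNat + 3) := by
            rw [List.drop_drop, List.drop_drop]
            ring_nf
          rw [hdd2]
          have h1'' : ¬PySem.Chars.find (List.drop (start + (f0.toNat + 3)) s) pvBT = -1 := by
            rw [hdd']; exact h1
          simp [h1'']

-- ===== VERDICT (by name: the statement is the Claim_ definition above) =====
theorem parse_objective_spec : Claim_equal_parse_objective := by
  intro objective _
  unfold Spec_parse_objective parse_objective parse_objective_alt
  rw [pvLoop_eq_scan objective.toList objective.toList.length 0 [] (by omega)]
  simp
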